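-- pv_equiv track=rewrite | github.com/jesrav/advent-of-code-2021 | src/day1.py | create_moving_averages
-- ===== SOURCE A (Python) =====
-- from typing import List
--
-- def create_moving_averages(depths: List[int]) -> List[int]:
--     moving_sums = []
--     for i, depth in enumerate(depths):
--         if i < 2:
--             moving_sum = None
--         else:
--             moving_sum = depth + depths[i - 1] + depths[i - 2]
--         moving_sums.append(moving_sum)
--     return moving_sums
-- ===== SOURCE B (Python) =====
-- def create_moving_averages(depths):
--     prefix = [0]
--     for d in depths:
--         prefix.append(prefix[-1] + d)
--     n = len(depths)
--     return [None] * min(2, n) + [prefix[i + 1] - prefix[i - 2] for i in range(2, n)]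
-- ===== Notes on version B (the rewrite author's own statement) =====
-- stated objective: alternative
-- what changed: B first builds a prefix-sum array in one pass and then reads each 3-window sum as a difference of two prefix sums (prefix[i+1]-prefix[i-2]) after a None prefix, instead of A's single indexed loop that re-adds three elements per position with an i<2 branch.
import Mathlib
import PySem

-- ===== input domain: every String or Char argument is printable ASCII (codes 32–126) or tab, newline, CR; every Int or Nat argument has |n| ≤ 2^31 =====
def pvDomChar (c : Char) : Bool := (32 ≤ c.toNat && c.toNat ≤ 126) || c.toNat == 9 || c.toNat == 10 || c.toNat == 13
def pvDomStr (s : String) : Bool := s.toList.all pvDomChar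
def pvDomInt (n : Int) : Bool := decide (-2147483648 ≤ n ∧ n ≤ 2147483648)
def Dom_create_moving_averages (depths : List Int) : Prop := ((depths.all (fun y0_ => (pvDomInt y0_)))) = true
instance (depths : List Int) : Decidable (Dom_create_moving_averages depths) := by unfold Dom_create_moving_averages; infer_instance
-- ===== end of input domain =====

-- B builds a prefix-sum array in one pass and reads each 3-window sum as a difference of two prefix sums (alternative algorithm; same cost).
-- ===== PORT A =====
-- depths[i-1] / depths[i-2] are ported with pyGetD: for i >= 2 the indices are always in range, so the default is never used (exact).
def create_moving_averages (depths : List Int) : List (Option Int) :=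
  (PySem.List.enumerate depths).foldl
    (fun moving_sums p =>
      let moving_sum : Option Int :=
        if p.1 < 2 then none
        else some (p.2 + PySem.List.pyGetD depths (p.1 - 1) 0 + PySem.List.pyGetD depths (p.1 - 2) 0)
      moving_sums ++ [moving_sum]) []

-- ===== PORT B =====
-- prefix[-1] is ported with pyGetD at -1 (prefix is never empty, so the default is never used; exact);
-- prefix[i+1] / prefix[i-2] are in range for 2 <= i < n, so pyGetD's default is never used there either.
def create_moving_averages_alt (depths : List Int) : List (Option Int) :=
  let pre := depths.foldl (fun a d => a ++ [PySem.List.pyGetD a (-1) 0 + d]) [0]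
  let n : Int := depths.length
  List.replicate (min 2 depths.length) (none : Option Int) ++
    (PySem.List.pyRange 2 n 1).map (fun i =>
      some (PySem.List.pyGetD pre (i + 1) 0 - PySem.List.pyGetD pre (i - 2) 0))

-- ===== PRECONDITION & SPEC =====
def Spec_create_moving_averages (depths : List Int) (out : List (Option Int)) : Prop := out = create_moving_averages_alt depths
instance (depths : List Int) (out : List (Option Int)) : Decidable (Spec_create_moving_averages depths out) := by unfold Spec_create_moving_averages; infer_instance

-- ===== CLAIM (what is proved, stated in full; the proofs are below) =====
def Claim_equal_create_moving_averages : Prop := ∀ (depths : List Int), Dom_create_moving_averages depths → Spec_create_moving_averages depths (create_moving_averages depths)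

-- ===== LEMMAS AND PROOFS =====

-- A as a map over enumerate
theorem A_eq_map (depths : List Int) : create_moving_averages depths =
    (PySem.List.enumerate depths).map (fun p =>
      if p.1 < 2 then none
      else some (p.2 + PySem.List.pyGetD depths (p.1 - 1) 0 + PySem.List.pyGetD depths (p.1 - 2) 0)) := by
  show (PySem.List.enumerate depths).foldl (fun acc p => acc ++ [(fun p =>
      if p.1 < 2 then (none : Option Int)
      else some (p.2 + PySem.List.pyGetD depths (p.1 - 1) 0 + PySem.List.pyGetD depths (p.1 - 2) 0)) p]) [] = _
  rw [PySem.List.foldl_append_singleton_eq_map]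
  simp

-- the running-sum list produced by B's loop, in recursive form
def runsums : List Int → Int → List Int
  | [], _ => []
  | d :: t, s => (s + d) :: runsums t (s + d)

theorem length_runsums (xs : List Int) (s : Int) : (runsums xs s).length = xs.length := by
  induction xs generalizing s with
  | nil => rfl
  | cons d t ih => simp [runsums, ih]

theorem getElem_runsums (xs : List Int) (s : Int) (k : Nat) (hk : k < xs.length) :
    (runsums xs s)[k]'(by rw [length_runsums]; exact hk) = s + (xs.take (k + 1)).sum := by
  induction xs generalizing s k with
  | nil => simp at hk
  | cons d t ih =>
    cases k with
    | zero => simp [runsums]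
    | succ k =>
      simp only [runsums, List.getElem_cons_succ, List.take_succ_cons, List.sum_cons]
      rw [ih (s + d) k (by simpa using hk)]
      ring

theorem prefix_foldl (xs acc : List Int) (h : acc ≠ []) :
    xs.foldl (fun a d => a ++ [PySem.List.pyGetD a (-1) 0 + d]) acc
      = acc ++ runsums xs (acc.getLast h) := by
  induction xs generalizing acc with
  | nil => simp [runsums]
  | cons d t ih =>
    simp only [List.foldl_cons, runsums]
    rw [PySem.List.pyGetD_neg_one _ _ h, ih (acc ++ [acc.getLast h + d]) (by simp)]
    simp

theorem prefix_getElem (xs : List Int) (k : Nat) (hk : k ≤ xs.length) :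
    (xs.foldl (fun a d => a ++ [PySem.List.pyGetD a (-1) 0 + d]) [0])[k]'
      (by rw [prefix_foldl xs [0] (by simp)]; simp [length_runsums]; omega)
    = (xs.take k).sum := by
  rw [List.getElem_of_eq (prefix_foldl xs [0] (by simp))]
  cases k with
  | zero => simp
  | succ k =>
    rw [List.getElem_append_right (by simp)]
    simp only [List.length_cons, List.length_nil, Nat.add_sub_cancel]
    rw [getElem_runsums xs ([0].getLast (by simp)) k (by omega)]
    simp

theorem ab_eq (depths : List Int) : create_moving_averages depths = create_moving_averages_alt depths := by
  rw [A_eq_map]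
  simp only [create_moving_averages_alt]
  apply List.ext_getElem
  · simp [PySem.List.length_enumerate]
    omega
  · intro i h1 h2
    have hn : i < depths.length := by simpa [PySem.List.length_enumerate] using h1
    simp only [List.getElem_map, PySem.List.getElem_enumerate, Int.zero_add]
    by_cases hi : i < 2
    · rw [List.getElem_append_left (by simp only [List.length_replicate]; omega)]
      simp
      omega
    · have h2le : 2 ≤ depths.length := by omega
      rw [List.getElem_append_right (by simp only [List.length_replicate]; omega), if_neg (by omega : ¬ ((i : Int) < 2))]
      simp only [List.getElem_map, List.length_replicate]
      rw [PySem.List.getElem_pyRange_one]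
      have hlen : (depths.foldl (fun a d => a ++ [PySem.List.pyGetD a (-1) 0 + d]) [0]).length
          = depths.length + 1 := by
        rw [prefix_foldl depths [0] (by simp)]; simp [length_runsums]
      have hmin : min 2 depths.length = 2 := by omega
      rw [hmin]
      have harg : (2 : Int) + (i - 2 : Nat) = ((i - 1 : Nat) : Int) + 1 := by omega
      rw [harg]
      have harg2 : ((i - 1 : Nat) : Int) + 1 + 1 = ((i + 1 : Nat) : Int) := by omega
      have harg3 : ((i - 1 : Nat) : Int) + 1 - 2 = ((i - 2 : Nat) : Int) := by omega
      rw [harg2, harg3, PySem.List.pyGetD_natCast, PySem.List.pyGetD_natCast]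
      rw [List.getD_eq_getElem _ _ (by omega), List.getD_eq_getElem _ _ (by omega)]
      rw [prefix_getElem depths (i + 1) (by omega), prefix_getElem depths (i - 2) (by omega)]
      have e1 : (depths.take (i + 1)).sum = (depths.take i).sum + depths[i] :=
        List.sum_take_succ _ _ hn
      have e2 : (depths.take i).sum = (depths.take (i - 1)).sum + depths[i - 1]'(by omega) := by
        have h := List.sum_take_succ depths (i - 1) (show i - 1 < depths.length by omega)
        rwa [show (i - 1) + 1 = i from by omega] at h
      have e3 : (depths.take (i - 1)).sum = (depths.take (i - 2)).sum + depths[i - 2]'(by omega) := by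
        have h := List.sum_take_succ depths (i - 2) (show i - 2 < depths.length by omega)
        rwa [show (i - 2) + 1 = i - 1 from by omega] at h
      rw [show (i : Int) - 1 = ((i - 1 : Nat) : Int) from by omega,
          show (i : Int) - 2 = ((i - 2 : Nat) : Int) from by omega,
          PySem.List.pyGetD_natCast, PySem.List.pyGetD_natCast]
      rw [List.getD_eq_getElem _ _ (by omega), List.getD_eq_getElem _ _ (by omega)]
      rw [e1, e2, e3]
      simp
      ring

-- ===== VERDICT (by name: the statement is the Claim_ definition above) =====
theorem create_moving_averages_spec : Claim_equal_create_moving_averages := by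
  intro depths _
  exact ab_eq depths
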